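-- pv_equiv track=rewrite | github.com/seanluo1/Arm-Link-AI | geometry.py | isArmWithinWindow
-- ===== SOURCE A (Python) =====
-- def isArmWithinWindow(armPos, window):
--     """Determine whether the given arm stays in the window
--
--         Args:
--             armPos (list): start and end position of all arm links [(start, end)]
--             window (tuple): (width, height) of the window
--
--         Return:
--             True if all parts are in the window. False it not.
--     """
--     for arm in armPos:
--         if arm[0][0] > window[0] or arm[0][0] < 0:
--             return False
--         if arm[0][1] > window[1] or arm[0][1] < 0:
--             return False
--         if arm[1][0] > window[0] or arm[1][0] < 0:
--             return False
--         if arm[1][1] > window[1] or arm[1][1] < 0: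
--             return False
--     return True
-- ===== SOURCE B (Python) =====
-- def isArmWithinWindow(armPos, window):
--     if not armPos:
--         return True
--     xs = [c for arm in armPos for c in (arm[0][0], arm[1][0])]
--     ys = [c for arm in armPos for c in (arm[0][1], arm[1][1])]
--     return min(xs) >= 0 and max(xs) <= window[0] and min(ys) >= 0 and max(ys) <= window[1]
-- ===== Notes on version B (the rewrite author's own statement) =====
-- stated objective: alternative
-- what changed: B replaces A's per-arm short-circuiting chain of four range checks with one aggregate pass: it collects all x- and y-coordinates and compares min/max of each list against the window bounds.
import Mathlib
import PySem

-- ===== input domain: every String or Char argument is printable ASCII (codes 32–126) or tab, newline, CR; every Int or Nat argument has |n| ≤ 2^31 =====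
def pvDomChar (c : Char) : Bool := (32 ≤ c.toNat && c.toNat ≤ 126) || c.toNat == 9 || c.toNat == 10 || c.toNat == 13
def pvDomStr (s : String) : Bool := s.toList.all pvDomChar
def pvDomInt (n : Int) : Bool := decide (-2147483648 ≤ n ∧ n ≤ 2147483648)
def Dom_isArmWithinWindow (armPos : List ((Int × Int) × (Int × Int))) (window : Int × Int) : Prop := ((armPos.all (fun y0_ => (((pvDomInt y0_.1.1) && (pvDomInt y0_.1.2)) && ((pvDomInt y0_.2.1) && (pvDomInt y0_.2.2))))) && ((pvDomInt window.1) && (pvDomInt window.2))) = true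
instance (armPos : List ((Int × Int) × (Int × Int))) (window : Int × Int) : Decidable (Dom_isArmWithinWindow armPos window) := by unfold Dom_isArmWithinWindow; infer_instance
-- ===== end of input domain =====

-- B checks the same window containment by one aggregate min/max pass over all coordinates
-- instead of A's per-arm short-circuiting chain of four range checks (objective: alternative).

-- ===== PORT A =====
def isArmWithinWindow (armPos : List ((Int × Int) × (Int × Int))) (window : Int × Int) : Bool :=
  match armPos with
  | [] => true
  | arm :: rest =>
    if arm.1.1 > window.1 || arm.1.1 < 0 then false
    else if arm.1.2 > window.2 || arm.1.2 < 0 then false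
    else if arm.2.1 > window.1 || arm.2.1 < 0 then false
    else if arm.2.2 > window.2 || arm.2.2 < 0 then false
    else isArmWithinWindow rest window

-- ===== PORT B =====
def isArmWithinWindow_alt (armPos : List ((Int × Int) × (Int × Int))) (window : Int × Int) : Bool :=
  match armPos with
  | [] => true
  | _ :: _ =>
    let xs := armPos.flatMap (fun arm => [arm.1.1, arm.2.1])
    let ys := armPos.flatMap (fun arm => [arm.1.2, arm.2.2])
    match PySem.List.min? xs (fun x => x), PySem.List.max? xs (fun x => x),
          PySem.List.min? ys (fun x => x), PySem.List.max? ys (fun x => x) with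
    | some mnx, some mxx, some mny, some mxy =>
        decide (0 ≤ mnx) && decide (mxx ≤ window.1) && decide (0 ≤ mny) && decide (mxy ≤ window.2)
    | _, _, _, _ => true  -- unreachable: the lists are nonempty

-- ===== PRECONDITION & SPEC =====
def Spec_isArmWithinWindow (armPos : List ((Int × Int) × (Int × Int))) (window : Int × Int) (out : Bool) : Prop := out = isArmWithinWindow_alt armPos window
instance (armPos : List ((Int × Int) × (Int × Int))) (window : Int × Int) (out : Bool) : Decidable (Spec_isArmWithinWindow armPos window out) := by unfold Spec_isArmWithinWindow; infer_instance

-- ===== CLAIM (what is proved, stated in full; the proofs are below) =====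
def Claim_equal_isArmWithinWindow : Prop := ∀ (armPos : List ((Int × Int) × (Int × Int))) (window : Int × Int), Dom_isArmWithinWindow armPos window → Spec_isArmWithinWindow armPos window (isArmWithinWindow armPos window)

-- ===== LEMMAS AND PROOFS =====

-- A computes "every coordinate of every arm is in range"
theorem portA_eq_all (armPos : List ((Int × Int) × (Int × Int))) (window : Int × Int) :
    isArmWithinWindow armPos window
      = armPos.all (fun arm =>
          decide (0 ≤ arm.1.1 ∧ arm.1.1 ≤ window.1) && decide (0 ≤ arm.1.2 ∧ arm.1.2 ≤ window.2)
          && decide (0 ≤ arm.2.1 ∧ arm.2.1 ≤ window.1) && decide (0 ≤ arm.2.2 ∧ arm.2.2 ≤ window.2)) := by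
  induction armPos with
  | nil => rfl
  | cons a t ih =>
    simp only [isArmWithinWindow, List.all_cons, ih]
    split_ifs with h1 h2 h3 h4 <;>
      simp only [Bool.or_eq_true, decide_eq_true_eq] at * <;>
      rw [Bool.eq_iff_iff] <;>
      simp only [Bool.false_eq_true, false_iff, iff_and_self, Bool.and_eq_true,
        decide_eq_true_eq, not_and, and_imp] <;>
      intros <;> omega

theorem min?_ge_iff (xs : List Int) (m c : Int)
    (h : PySem.List.min? xs (fun x => x) = some m) : (c ≤ m) ↔ ∀ x ∈ xs, c ≤ x := by
  constructor
  · intro hc x hx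
    exact le_trans hc (PySem.List.min?_isMin h x hx)
  · intro hall
    exact hall m (PySem.List.min?_mem h)

theorem max?_le_iff (xs : List Int) (m c : Int)
    (h : PySem.List.max? xs (fun x => x) = some m) : (m ≤ c) ↔ ∀ x ∈ xs, x ≤ c := by
  constructor
  · intro hc x hx
    exact le_trans (PySem.List.max?_isMax h x hx) hc
  · intro hall
    exact hall m (PySem.List.max?_mem h)

-- B computes the same "every coordinate in range" predicate
theorem portB_eq_all (armPos : List ((Int × Int) × (Int × Int))) (window : Int × Int) :
    isArmWithinWindow_alt armPos window
      = armPos.all (fun arm =>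
          decide (0 ≤ arm.1.1 ∧ arm.1.1 ≤ window.1) && decide (0 ≤ arm.1.2 ∧ arm.1.2 ≤ window.2)
          && decide (0 ≤ arm.2.1 ∧ arm.2.1 ≤ window.1) && decide (0 ≤ arm.2.2 ∧ arm.2.2 ≤ window.2)) := by
  match armPos with
  | [] => rfl
  | a :: t =>
    simp only [isArmWithinWindow_alt]
    set xs := (a :: t).flatMap (fun arm => [arm.1.1, arm.2.1]) with hxs
    set ys := (a :: t).flatMap (fun arm => [arm.1.2, arm.2.2]) with hys
    have hxsne : xs ≠ [] := by simp [hxs]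
    have hysne : ys ≠ [] := by simp [hys]
    obtain ⟨mnx, hmnx⟩ : ∃ m, PySem.List.min? xs (fun x => x) = some m := by
      cases hm : PySem.List.min? xs (fun x => x) with
      | none => exact absurd ((PySem.List.min?_eq_none_iff xs _).mp hm) hxsne
      | some m => exact ⟨m, rfl⟩
    obtain ⟨mxx, hmxx⟩ : ∃ m, PySem.List.max? xs (fun x => x) = some m := by
      cases hm : PySem.List.max? xs (fun x => x) with
      | none => exact absurd ((PySem.List.max?_eq_none_iff xs _).mp hm) hxsne
      | some m => exact ⟨m, rfl⟩
    obtain ⟨mny, hmny⟩ : ∃ m, PySem.List.min? ys (fun x => x) = some m := by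
      cases hm : PySem.List.min? ys (fun x => x) with
      | none => exact absurd ((PySem.List.min?_eq_none_iff ys _).mp hm) hysne
      | some m => exact ⟨m, rfl⟩
    obtain ⟨mxy, hmxy⟩ : ∃ m, PySem.List.max? ys (fun x => x) = some m := by
      cases hm : PySem.List.max? ys (fun x => x) with
      | none => exact absurd ((PySem.List.max?_eq_none_iff ys _).mp hm) hysne
      | some m => exact ⟨m, rfl⟩
    rw [hmnx, hmxx, hmny, hmxy]
    have hmemx : ∀ z : Int, z ∈ xs ↔ ∃ arm ∈ a :: t, z = arm.1.1 ∨ z = arm.2.1 := by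
      intro z
      simp only [hxs, List.mem_flatMap, List.mem_cons, List.not_mem_nil, or_false]
    have hmemy : ∀ z : Int, z ∈ ys ↔ ∃ arm ∈ a :: t, z = arm.1.2 ∨ z = arm.2.2 := by
      intro z
      simp only [hys, List.mem_flatMap, List.mem_cons, List.not_mem_nil, or_false]
    have h1 := min?_ge_iff xs mnx 0 hmnx
    have h2 := max?_le_iff xs mxx window.1 hmxx
    have h3 := min?_ge_iff ys mny 0 hmny
    have h4 := max?_le_iff ys mxy window.2 hmxy
    rw [Bool.eq_iff_iff]
    simp only [Bool.and_eq_true, decide_eq_true_eq, List.all_eq_true, h1, h2, h3, h4]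
    constructor
    · rintro ⟨⟨⟨hx0, hxw⟩, hy0⟩, hyw⟩ arm harm
      refine ⟨⟨⟨⟨?_, ?_⟩, ?_, ?_⟩, ?_, ?_⟩, ?_, ?_⟩
      · exact hx0 _ ((hmemx _).mpr ⟨arm, harm, Or.inl rfl⟩)
      · exact hxw _ ((hmemx _).mpr ⟨arm, harm, Or.inl rfl⟩)
      · exact hy0 _ ((hmemy _).mpr ⟨arm, harm, Or.inl rfl⟩)
      · exact hyw _ ((hmemy _).mpr ⟨arm, harm, Or.inl rfl⟩)
      · exact hx0 _ ((hmemx _).mpr ⟨arm, harm, Or.inr rfl⟩)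
      · exact hxw _ ((hmemx _).mpr ⟨arm, harm, Or.inr rfl⟩)
      · exact hy0 _ ((hmemy _).mpr ⟨arm, harm, Or.inr rfl⟩)
      · exact hyw _ ((hmemy _).mpr ⟨arm, harm, Or.inr rfl⟩)
    · intro hall
      refine ⟨⟨⟨?_, ?_⟩, ?_⟩, ?_⟩
      · intro x hx
        obtain ⟨arm, harm, hz | hz⟩ := (hmemx _).mp hx
        · exact hz ▸ (hall arm harm).1.1.1.1
        · exact hz ▸ (hall arm harm).1.2.1
      · intro x hx
        obtain ⟨arm, harm, hz | hz⟩ := (hmemx _).mp hx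
        · exact hz ▸ (hall arm harm).1.1.1.2
        · exact hz ▸ (hall arm harm).1.2.2
      · intro y hy
        obtain ⟨arm, harm, hz | hz⟩ := (hmemy _).mp hy
        · exact hz ▸ (hall arm harm).1.1.2.1
        · exact hz ▸ (hall arm harm).2.1
      · intro y hy
        obtain ⟨arm, harm, hz | hz⟩ := (hmemy _).mp hy
        · exact hz ▸ (hall arm harm).1.1.2.2
        · exact hz ▸ (hall arm harm).2.2

-- ===== VERDICT (by name: the statement is the Claim_ definition above) =====
theorem isArmWithinWindow_spec : Claim_equal_isArmWithinWindow := by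
  intro armPos window _
  unfold Spec_isArmWithinWindow
  rw [portA_eq_all, portB_eq_all]
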